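-- pv_equiv track=rewrite | github.com/amrit446/word_composition_problem | input2.py | find_longest_and_second_longest_compounded_words
-- ===== SOURCE A (Python) =====
-- def is_compounded(word, word_set):
--     if not word:
--         return False
--
--     n = len(word)
--     dp = [False] * (n + 1)
--     dp[0] = True
--
--     for i in range(1, n + 1):
--         for j in range(i):
--             if dp[j] and word[j:i] in word_set:
--                 dp[i] = True
--                 break
--
--     return dp[n]
--
-- def find_longest_and_second_longest_compounded_words(word_list):
--     word_set = set(word_list)
--     word_list.sort(key=lambda x: (-len(x), x))
--
--     longest_compounded_word = ""
--     second_longest_compounded_word = ""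
--
--     for word in word_list:
--         word_set.remove(word)
--         if is_compounded(word, word_set):
--             if not longest_compounded_word:
--                 longest_compounded_word = word
--             else:
--                 second_longest_compounded_word = word
--                 break
--
--     return longest_compounded_word, second_longest_compounded_word
-- ===== SOURCE B (Python) =====
-- def find_longest_and_second_longest_compounded_words(word_list):
--     word_list.sort(key=lambda x: (-len(x), x))
--     words = set(word_list)
--     prefixes = {w[:k] for w in word_list for k in range(1, len(w) + 1)}
--
--     def can_break(w):
--         # forward reachability over cut positions; a word never counts as its
--         # own (single) part, so no set mutation is needed
--         n = len(w)
--         if n == 0: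
--             return False
--         reach = [False] * (n + 1)
--         reach[0] = True
--         for j in range(n):
--             if not reach[j]:
--                 continue
--             piece = ""
--             for i in range(j + 1, n + 1):
--                 piece += w[i - 1]
--                 if piece not in prefixes:
--                     break  # no word extends this piece
--                 if piece in words and (j, i) != (0, n):
--                     reach[i] = True
--         return reach[n]
--
--     gen = (w for w in word_list if can_break(w))
--     first = next(gen, "")
--     second = next(gen, "")
--     return first, second
-- ===== Notes on version B (the rewrite author's own statement) =====
-- stated objective: alternative
-- what changed: Word-break per word is re-done as forward reachability over cut positions with an incrementally built piece pruned by a precomputed prefix set (a flat trie), checking against the full word set with the word itself excluded as a single part, instead of A's backward DP over all (j,i) slice pairs against a mutated shrinking set; the two compounded words are taken from a generator instead of flag-driven loop state.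
-- outside the precondition, e.g. on find_longest_and_second_longest_compounded_words(['abab', 'ab', 'ab', 'a', 'b']): A returns ('abab', 'ab'), B returns ('abab', 'ab')
import Mathlib
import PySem

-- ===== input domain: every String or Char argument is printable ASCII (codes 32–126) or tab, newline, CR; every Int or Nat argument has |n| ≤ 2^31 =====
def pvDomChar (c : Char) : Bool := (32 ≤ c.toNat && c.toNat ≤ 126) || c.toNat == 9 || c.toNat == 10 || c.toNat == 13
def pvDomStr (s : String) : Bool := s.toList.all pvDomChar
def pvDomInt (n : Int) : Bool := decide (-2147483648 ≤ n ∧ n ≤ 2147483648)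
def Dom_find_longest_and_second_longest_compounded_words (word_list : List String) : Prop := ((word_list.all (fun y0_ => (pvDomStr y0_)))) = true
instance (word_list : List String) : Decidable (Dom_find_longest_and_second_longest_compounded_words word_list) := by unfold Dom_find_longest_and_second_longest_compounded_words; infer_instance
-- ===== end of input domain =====

-- B replaces A's backward slice-pair DP (against a destructively shrinking set) by forward
-- reachability with a prefix-set-pruned incremental piece against the full word set
-- (alternative algorithm, same results); both A and B sort word_list in place — the
-- equivalence proved here is about the return value (the in-place sort is identical anyway).


-- ===== PORT A =====
-- is_compounded(word, word_set): backward DP dp[i] over all split points j < i,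
-- testing the slice word[j:i] against the set (strings handled as char lists).
def pvIsCompounded (word : List Char) (word_set : PySem.Set (List Char)) : Bool :=
  if word = [] then false
  else
    let n : Nat := word.length
    let dp0 : List Bool := (List.replicate (n + 1) false).set 0 true
    let dp : List Bool :=
      (PySem.List.pyRange 1 ((n : Int) + 1) 1).foldl (fun dp i =>
        if (PySem.List.pyRange 0 i 1).any (fun j =>
              PySem.List.pyGetD dp j false &&
              PySem.Set.contains word_set (PySem.List.slice word (some j) (some i)))
        then PySem.List.pySetD dp i true else dp) dp0
    PySem.List.pyGetD dp (n : Int) false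

-- loop body of A's main loop; state: (word_set, longest, second, broke-out-of-loop)
def pvStepA (st : PySem.Set (List Char) × String × String × Bool) (word : String) :
    PySem.Set (List Char) × String × String × Bool :=
  if st.2.2.2 then st
  else
    let ws := (PySem.Set.remove? st.1 word.toList).getD st.1  -- KeyError excluded by Pre_
    if pvIsCompounded word.toList ws then
      if st.2.1 = "" then (ws, word, st.2.2.1, false)
      else (ws, st.2.1, word, true)
    else (ws, st.2.1, st.2.2.1, false)

def find_longest_and_second_longest_compounded_words (word_list : List String) : String × String :=
  let word_set : PySem.Set (List Char) := PySem.Set.ofList (word_list.map String.toList)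
  let sorted_list := PySem.List.sorted2 word_list (fun x => -(PySem.Str.len x)) (fun x => x) false
  let r := sorted_list.foldl pvStepA (word_set, "", "", false)
  (r.2.1, r.2.2.1)

-- ===== PORT B =====
-- inner loop of can_break: extend piece one char at a time from split point j,
-- stopping as soon as it is no longer a prefix of any word.
def pvScan (w : List Char) (words prefixes : PySem.Set (List Char)) (n j : Nat)
    (piece : List Char) (i : Nat) (reach : List Bool) : List Bool :=
  if h : n < i then reach
  else
    let piece' := piece ++ [PySem.List.pyGetD w ((i : Int) - 1) ' ']
    if !(PySem.Set.contains prefixes piece') then reach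
    else
      let reach' := if PySem.Set.contains words piece' && !(decide (j = 0) && decide (i = n))
                    then PySem.List.pySetD reach (i : Int) true else reach
      pvScan w words prefixes n j piece' (i + 1) reach'
  termination_by n + 1 - i

def pvCanBreak (w : List Char) (words prefixes : PySem.Set (List Char)) : Bool :=
  let n := w.length
  if n = 0 then false
  else
    let reach0 : List Bool := (List.replicate (n + 1) false).set 0 true
    let reach :=
      (PySem.List.pyRange 0 (n : Int) 1).foldl (fun reach j =>
        if PySem.List.pyGetD reach j false then
          pvScan w words prefixes n j.toNat [] (j.toNat + 1) reach
        else reach) reach0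
    PySem.List.pyGetD reach (n : Int) false

-- next(gen, default) on a generator filtering the sorted list: first match and the rest
def pvFirstRest (pred : String → Bool) : List String → Option (String × List String)
  | [] => none
  | w :: r => if pred w then some (w, r) else pvFirstRest pred r

def find_longest_and_second_longest_compounded_words_alt (word_list : List String) : String × String :=
  let sl := PySem.List.sorted2 word_list (fun x => -(PySem.Str.len x)) (fun x => x) false
  let words : PySem.Set (List Char) := PySem.Set.ofList (sl.map String.toList)
  let prefixes : PySem.Set (List Char) := PySem.Set.ofList
    (sl.flatMap (fun w =>
      (PySem.List.pyRange 1 (PySem.Str.len w + 1) 1).map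
        (fun k => PySem.List.slice w.toList none (some k))))
  let pred := fun w => pvCanBreak w.toList words prefixes
  match pvFirstRest pred sl with
  | none => ("", "")
  | some (first, rest) =>
    match pvFirstRest pred rest with
    | none => (first, "")
    | some (second, _) => (first, second)

-- ===== PRECONDITION & SPEC =====
-- Pre_ excludes lists with a repeated word: on those A's word_set.remove raises KeyError as
-- soon as the loop reaches a second occurrence (A returns on such lists only when it happens
-- to break off beforehand).
def Pre_find_longest_and_second_longest_compounded_words (word_list : List String) : Prop :=
  word_list.Nodup
instance (word_list : List String) : Decidable (Pre_find_longest_and_second_longest_compounded_words word_list) := by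
  unfold Pre_find_longest_and_second_longest_compounded_words; infer_instance

def pvWitness_find_longest_and_second_longest_compounded_words : List String :=
  ["catsdogcats", "cats", "cat", "dog", "dogcats", "rat"]

def Spec_find_longest_and_second_longest_compounded_words (word_list : List String) (out : String × String) : Prop := out = find_longest_and_second_longest_compounded_words_alt word_list
instance (word_list : List String) (out : String × String) : Decidable (Spec_find_longest_and_second_longest_compounded_words word_list out) := by unfold Spec_find_longest_and_second_longest_compounded_words; infer_instance

-- ===== CLAIM (what is proved, stated in full; the proofs are below) =====
def Claim_equal_find_longest_and_second_longest_compounded_words : Prop := ∀ (word_list : List String), Dom_find_longest_and_second_longest_compounded_words word_list → Pre_find_longest_and_second_longest_compounded_words word_list → Spec_find_longest_and_second_longest_compounded_words word_list (find_longest_and_second_longest_compounded_words word_list)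

-- ===== LEMMAS AND PROOFS =====

theorem pvWitness_ok :
    Dom_find_longest_and_second_longest_compounded_words pvWitness_find_longest_and_second_longest_compounded_words ∧
    Pre_find_longest_and_second_longest_compounded_words pvWitness_find_longest_and_second_longest_compounded_words := by
  constructor <;> decide

-- ---------- common word-break predicate ----------
def pvSub (w : List Char) (j i : Nat) : List Char := (w.drop j).take (i - j)

def pvBrkAux (e : Nat → Nat → Bool) : Nat → List Bool
  | 0 => [true]
  | i + 1 =>
    (pvBrkAux e i) ++ [(List.range (i + 1)).any (fun j => (pvBrkAux e i).getD j false && e j (i + 1))]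

def pvBrk (e : Nat → Nat → Bool) (i : Nat) : Bool := (pvBrkAux e i).getD i false

def pvEdgeA (word : List Char) (S : PySem.Set (List Char)) (j i : Nat) : Bool :=
  PySem.Set.contains S (pvSub word j i)

def pvEdgeB (w : List Char) (words : PySem.Set (List Char)) (j i : Nat) : Bool :=
  PySem.Set.contains words (pvSub w j i) && !(decide (j = 0) && decide (i = w.length))

def pvLenGE (a b : String) : Prop := b.toList.length ≤ a.toList.length

def pvClosed (words prefixes : PySem.Set (List Char)) : Prop :=
  ∀ s ∈ words, ∀ k : Nat, 1 ≤ k → k ≤ s.length → s.take k ∈ prefixes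

theorem length_pvBrkAux (e : Nat → Nat → Bool) (m : Nat) : (pvBrkAux e m).length = m + 1 := by
  induction m with
  | zero => rfl
  | succ m ih => simp [pvBrkAux, ih]

theorem pvBrkAux_getD (e : Nat → Nat → Bool) {j m : Nat} (h : j ≤ m) :
    (pvBrkAux e m).getD j false = pvBrk e j := by
  induction m with
  | zero => interval_cases j; rfl
  | succ m ih =>
    rcases Nat.lt_or_ge j (m + 1) with hj | hj
    · have hlt : j < (pvBrkAux e m).length := by rw [length_pvBrkAux]; exact hj
      show ((pvBrkAux e m) ++ _).getD j false = _
      rw [List.getD_append _ _ _ _ hlt]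
      exact ih (Nat.lt_succ_iff.mp hj)
    · have : j = m + 1 := le_antisymm h hj
      subst this; rfl

theorem pvBrk_succ (e : Nat → Nat → Bool) (i : Nat) :
    pvBrk e (i + 1) = (List.range (i + 1)).any (fun j => pvBrk e j && e j (i + 1)) := by
  have h1 : pvBrk e (i + 1)
      = (List.range (i + 1)).any (fun j => (pvBrkAux e i).getD j false && e j (i + 1)) := by
    show (pvBrkAux e i ++ _).getD (i + 1) false = _
    rw [List.getD_append_right _ _ _ _ (by rw [length_pvBrkAux])]
    simp [length_pvBrkAux]
  rw [h1]
  apply PySem.List.any_congr_mem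
  intro j hj
  rw [pvBrkAux_getD e (Nat.lt_succ_iff.mp (List.mem_range.mp hj))]

theorem pvBrk_congr {e1 e2 : Nat → Nat → Bool} {N : Nat}
    (h : ∀ j i, j < i → i ≤ N → e1 j i = e2 j i) :
    ∀ i, i ≤ N → pvBrk e1 i = pvBrk e2 i := by
  intro i
  induction i using Nat.strong_induction_on with
  | _ i IH =>
    intro hi
    match i with
    | 0 => rfl
    | i + 1 =>
      rw [pvBrk_succ, pvBrk_succ]
      apply PySem.List.any_congr_mem
      intro j hj
      have hj' : j < i + 1 := List.mem_range.mp hj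
      rw [IH j hj' (le_trans (Nat.le_of_lt hj') hi), h j (i + 1) hj' hi]

theorem any_pyRange (n : Nat) (f : Int → Bool) :
    (PySem.List.pyRange 0 (n : Int)).any f = (List.range n).any (fun j => f (j : Int)) := by
  induction n with
  | zero => rfl
  | succ n ih =>
    have hc : ((n + 1 : Nat) : Int) = (n : Int) + 1 := by push_cast; ring
    rw [hc, PySem.List.pyRange_one_succ_right (by omega), List.range_succ]
    simp [List.any_append, ih]

-- ---------- A's is_compounded = pvBrk with the plain-membership edge ----------
theorem pvDP_inv (word : List Char) (S : PySem.Set (List Char)) :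
    ∀ m, m ≤ word.length →
    (((PySem.List.pyRange 1 ((m : Int) + 1)).foldl (fun dp i =>
        if (PySem.List.pyRange 0 i).any (fun j =>
              PySem.List.pyGetD dp j false &&
              PySem.Set.contains S (PySem.List.slice word (some j) (some i)))
        then PySem.List.pySetD dp i true else dp)
      ((List.replicate (word.length + 1) false).set 0 true)).length = word.length + 1) ∧
    (∀ k, k ≤ word.length →
      (((PySem.List.pyRange 1 ((m : Int) + 1)).foldl (fun dp i =>
          if (PySem.List.pyRange 0 i).any (fun j =>
                PySem.List.pyGetD dp j false &&
                PySem.Set.contains S (PySem.List.slice word (some j) (some i)))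
          then PySem.List.pySetD dp i true else dp)
        ((List.replicate (word.length + 1) false).set 0 true)).getD k false
        = if k ≤ m then pvBrk (pvEdgeA word S) k else false)) := by
  intro m
  induction m with
  | zero =>
    intro _
    have hnil : PySem.List.pyRange 1 (((0 : Nat) : Int) + 1) = [] :=
      PySem.List.pyRange_one_eq_nil (by norm_num)
    rw [hnil]
    constructor
    · simp
    · intro k hk
      simp only [List.foldl_nil]
      match k with
      | 0 => simp [pvBrk, pvBrkAux]
      | k + 1 =>
        rw [if_neg (by omega)]
        rw [List.getD_eq_getElem?_getD]
        rcases Nat.lt_or_ge (k + 1) (word.length + 1) with hlt | hge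
        · rw [List.getElem?_set_ne (by omega), List.getElem?_replicate_of_lt hlt]; rfl
        · rw [List.getElem?_eq_none (by simpa using hge)]; rfl
  | succ m ih =>
    intro hm
    have ihm := ih (by omega)
    have hsplit : PySem.List.pyRange 1 (((m + 1 : Nat) : Int) + 1)
        = PySem.List.pyRange 1 ((m : Int) + 1) ++ [(m : Int) + 1] := by
      have : (((m + 1 : Nat) : Int) + 1) = ((m : Int) + 1) + 1 := by push_cast; ring
      rw [this, PySem.List.pyRange_one_succ_right (by omega)]
    rw [hsplit, List.foldl_append, List.foldl_cons, List.foldl_nil]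
    set dp := (PySem.List.pyRange 1 ((m : Int) + 1)).foldl (fun dp i =>
        if (PySem.List.pyRange 0 i).any (fun j =>
              PySem.List.pyGetD dp j false &&
              PySem.Set.contains S (PySem.List.slice word (some j) (some i)))
        then PySem.List.pySetD dp i true else dp)
      ((List.replicate (word.length + 1) false).set 0 true) with hdp
    -- the guard is pvBrk (m+1)
    have hcast : ((m : Int) + 1) = ((m + 1 : Nat) : Int) := by push_cast; ring
    have hguard : (PySem.List.pyRange 0 ((m : Int) + 1)).any (fun j =>
          PySem.List.pyGetD dp j false &&
          PySem.Set.contains S (PySem.List.slice word (some j) (some ((m : Int) + 1))))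
        = pvBrk (pvEdgeA word S) (m + 1) := by
      rw [hcast, any_pyRange]
      rw [pvBrk_succ]
      apply PySem.List.any_congr_mem
      intro j hj
      have hj' : j < m + 1 := List.mem_range.mp hj
      rw [PySem.List.pyGetD_natCast, PySem.List.slice_natCast]
      rw [ihm.2 j (by omega), if_pos (by omega)]
      rfl
    rw [hguard]
    by_cases hb : pvBrk (pvEdgeA word S) (m + 1) = true
    · rw [if_pos hb, hcast, PySem.List.pySetD_natCast]
      constructor
      · rw [List.length_set, ihm.1]
      · intro k hk
        rw [List.getD_eq_getElem?_getD]
        rcases Nat.decEq k (m + 1) with hne | heq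
        · rw [List.getElem?_set_ne (by omega)]
          rw [← List.getD_eq_getElem?_getD, ihm.2 k hk]
          rcases Nat.lt_or_ge m k with h1 | h2
          · rw [if_neg (by omega), if_neg (by omega)]
          · rw [if_pos (by omega), if_pos (by omega)]
        · subst heq
          rw [List.getElem?_set_self (by rw [ihm.1]; omega)]
          rw [if_pos (le_refl _)]
          simp [hb]
    · rw [if_neg hb]
      refine ⟨ihm.1, ?_⟩
      intro k hk
      rw [ihm.2 k hk]
      rcases Nat.decEq k (m + 1) with hne | heq
      · rcases Nat.lt_or_ge m k with h1 | h2
        · rw [if_neg (by omega), if_neg (by omega)]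
        · rw [if_pos (by omega), if_pos (by omega)]
      · subst heq
        rw [if_neg (by omega), if_pos (le_refl _)]
        simp at hb
        exact hb.symm

theorem pvIsCompounded_eq (word : List Char) (S : PySem.Set (List Char)) :
    pvIsCompounded word S = (!decide (word = []) && pvBrk (pvEdgeA word S) word.length) := by
  by_cases hw : word = []
  · simp [pvIsCompounded, hw]
  · have h := pvDP_inv word S word.length (le_refl _)
    simp only [pvIsCompounded, if_neg hw]
    rw [PySem.List.pyGetD_natCast]
    rw [h.2 word.length (le_refl _), if_pos (le_refl _)]
    simp [hw]

-- ---------- B's can_break = pvBrk with the self-excluding edge ----------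
theorem pvSub_snoc (w : List Char) (j i : Nat) (hji : j < i) (hi : i ≤ w.length) :
    pvSub w j (i - 1) ++ [PySem.List.pyGetD w ((i : Int) - 1) ' '] = pvSub w j i := by
  have hc : ((i : Int) - 1) = ((i - 1 : Nat) : Int) := by omega
  rw [hc, PySem.List.pyGetD_natCast]
  unfold pvSub
  have h1 : i - j = (i - 1 - j) + 1 := by omega
  rw [h1, List.take_succ]
  congr 1
  have h2 : i - 1 - j < (w.drop j).length := by rw [List.length_drop]; omega
  rw [List.getElem?_eq_getElem h2]
  rw [List.getElem_drop]
  rw [List.getD_eq_getElem _ _ (by omega)]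
  simp only [Option.toList_some, List.cons.injEq, and_true]
  congr 1
  omega

theorem length_pvSub (w : List Char) (j i : Nat) (hji : j ≤ i) (hi : i ≤ w.length) :
    (pvSub w j i).length = i - j := by
  unfold pvSub
  rw [List.length_take, List.length_drop]
  omega

theorem length_pvScan (w : List Char) (words prefixes : PySem.Set (List Char)) (n j : Nat)
    (piece : List Char) (i : Nat) (reach : List Bool) :
    (pvScan w words prefixes n j piece i reach).length = reach.length := by
  fun_induction pvScan with
  | case1 => rfl
  | case2 => rfl
  | case3 piece i reach h piece' hpre reach' ih =>
    rw [ih]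
    simp only [reach']
    split
    · rw [PySem.List.pySetD_natCast, List.length_set]
    · rfl

theorem pvScan_getD (w : List Char) (words prefixes : PySem.Set (List Char)) (n j : Nat)
    (hcl : pvClosed words prefixes) (hn : w.length = n) :
    ∀ (i : Nat) (piece : List Char) (reach : List Bool), j < i → piece = pvSub w j (i - 1) →
    reach.length = n + 1 →
    ∀ k, k ≤ n →
    (pvScan w words prefixes n j piece i reach).getD k false =
      (reach.getD k false || decide (i ≤ k ∧ k ≤ n ∧ pvEdgeB w words j k = true)) := by
  suffices main : ∀ (d i : Nat) (piece : List Char) (reach : List Bool), n + 1 - i ≤ d →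
      j < i → piece = pvSub w j (i - 1) → reach.length = n + 1 →
      ∀ k, k ≤ n →
      (pvScan w words prefixes n j piece i reach).getD k false =
        (reach.getD k false || decide (i ≤ k ∧ k ≤ n ∧ pvEdgeB w words j k = true)) by
    intro i piece reach hji hpiece hlen k hk
    exact main (n + 1) i piece reach (by omega) hji hpiece hlen k hk
  intro d
  induction d with
  | zero =>
    intro i piece reach hd hji hpiece hlen k hk
    have hni : n < i := by omega
    rw [pvScan, dif_pos hni]
    have : decide (i ≤ k ∧ k ≤ n ∧ pvEdgeB w words j k = true) = false := by
      simp only [decide_eq_false_iff_not]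
      rintro ⟨h1, _, _⟩; omega
    rw [this, Bool.or_false]
  | succ d IH =>
    intro i piece reach hd hji hpiece hlen k hk
    rw [pvScan]
    by_cases hni : n < i
    · rw [dif_pos hni]
      have : decide (i ≤ k ∧ k ≤ n ∧ pvEdgeB w words j k = true) = false := by
        simp only [decide_eq_false_iff_not]
        rintro ⟨h1, _, _⟩; omega
      rw [this, Bool.or_false]
    · rw [dif_neg hni]
      have hin : i ≤ n := by omega
      have hpe : piece ++ [PySem.List.pyGetD w ((i : Int) - 1) ' '] = pvSub w j i := by
        rw [hpiece, pvSub_snoc w j i hji (by omega)]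
      set piece' := piece ++ [PySem.List.pyGetD w ((i : Int) - 1) ' '] with hp'
      by_cases hpref : (!(PySem.Set.contains prefixes piece')) = true
      · rw [if_pos hpref]
        have hedge : ∀ k', i ≤ k' → k' ≤ n → pvEdgeB w words j k' = false := by
          intro k' h1 h2
          unfold pvEdgeB
          have hcw : PySem.Set.contains words (pvSub w j k') = false := by
            by_contra hc
            have hc' : PySem.Set.contains words (pvSub w j k') = true := by
              cases h : PySem.Set.contains words (pvSub w j k')
              · exact absurd h hc
              · rfl
            have hmem : pvSub w j k' ∈ words := (PySem.Set.contains_iff _ _).mp hc'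
            have hlensub : (pvSub w j k').length = k' - j :=
              length_pvSub w j k' (by omega) (by omega)
            have htake := hcl _ hmem (i - j) (by omega) (by omega)
            have htt : (pvSub w j k').take (i - j) = pvSub w j i := by
              unfold pvSub
              rw [List.take_take]
              congr 1
              omega
            rw [htt] at htake
            have : PySem.Set.contains prefixes piece' = true := by
              rw [hpe]; exact (PySem.Set.contains_iff _ _).mpr htake
            rw [this] at hpref
            simp at hpref
          rw [hcw, Bool.false_and]
        have : decide (i ≤ k ∧ k ≤ n ∧ pvEdgeB w words j k = true) = false := by
          simp only [decide_eq_false_iff_not]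
          rintro ⟨h1, h2, h3⟩
          rw [hedge k h1 h2] at h3
          exact Bool.false_ne_true h3
        rw [this, Bool.or_false]
      · rw [if_neg hpref]
        have hcontains : PySem.Set.contains prefixes piece' = true := by
          cases h : PySem.Set.contains prefixes piece'
          · rw [h] at hpref; simp at hpref
          · rfl
        -- the inner conditional defining reach'
        set cond := (PySem.Set.contains words piece' && !(decide (j = 0) && decide (i = n))) with hcond
        have hedgei : pvEdgeB w words j i = cond := by
          unfold pvEdgeB
          rw [← hpe, hn]
        by_cases hc : cond = true
        · rw [if_pos hc]
          have hlen' : (PySem.List.pySetD reach (i : Int) true).length = n + 1 := by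
            rw [PySem.List.pySetD_natCast, List.length_set, hlen]
          have hrec := IH (i + 1) piece' (PySem.List.pySetD reach (i : Int) true)
            (by omega) (by omega) (by rw [hpe]; norm_num) hlen' k hk
          rw [hrec]
          rw [PySem.List.pySetD_natCast]
          rcases Nat.decEq k i with hne | heq
          · rw [List.getD_eq_getElem?_getD, List.getElem?_set_ne (by omega),
              ← List.getD_eq_getElem?_getD]
            have : decide (i + 1 ≤ k ∧ k ≤ n ∧ pvEdgeB w words j k = true)
                = decide (i ≤ k ∧ k ≤ n ∧ pvEdgeB w words j k = true) := by
              rw [decide_eq_decide]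
              constructor
              · rintro ⟨h1, h2, h3⟩; exact ⟨by omega, h2, h3⟩
              · rintro ⟨h1, h2, h3⟩; exact ⟨by omega, h2, h3⟩
            rw [this]
          · subst heq
            rw [List.getD_eq_getElem?_getD, List.getElem?_set_self (by omega)]
            have h2 : decide (k ≤ k ∧ k ≤ n ∧ pvEdgeB w words j k = true) = true := by
              simp only [decide_eq_true_eq]
              exact ⟨le_refl _, hk, by rw [hedgei]; exact hc⟩
            rw [h2]
            simp
        · rw [if_neg hc]
          have hrec := IH (i + 1) piece' reach
            (by omega) (by omega) (by rw [hpe]; norm_num) hlen k hk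
          rw [hrec]
          congr 1
          rcases Nat.decEq k i with hne | heq
          · rw [decide_eq_decide]
            constructor
            · rintro ⟨h1, h2, h3⟩; exact ⟨by omega, h2, h3⟩
            · rintro ⟨h1, h2, h3⟩; exact ⟨by omega, h2, h3⟩
          · subst heq
            have hff : pvEdgeB w words j k = false := by
              rw [hedgei]
              cases h : cond
              · rfl
              · exact absurd h hc
            simp [hff]

theorem pvBrk_eq_closed (e : Nat → Nat → Bool) (J : Nat) :
    (decide (J = 0) || (List.range J).any (fun j => pvBrk e j && decide (j < J) && e j J))
      = pvBrk e J := by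
  match J with
  | 0 => rfl
  | m + 1 =>
    rw [pvBrk_succ]
    have : decide (m + 1 = 0) = false := by simp
    rw [this, Bool.false_or]
    apply PySem.List.any_congr_mem
    intro j hj
    have : decide (j < m + 1) = true := by
      simp only [decide_eq_true_eq]
      exact List.mem_range.mp hj
    rw [this, Bool.and_true]

theorem pvCB_inv (w : List Char) (words prefixes : PySem.Set (List Char))
    (hcl : pvClosed words prefixes) (n : Nat) (hn : w.length = n) :
    ∀ J, J ≤ n →
    (((PySem.List.pyRange 0 (J : Int)).foldl (fun reach j =>
        if PySem.List.pyGetD reach j false then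
          pvScan w words prefixes n j.toNat [] (j.toNat + 1) reach
        else reach)
      ((List.replicate (n + 1) false).set 0 true)).length = n + 1) ∧
    (∀ k, k ≤ n →
      (((PySem.List.pyRange 0 (J : Int)).foldl (fun reach j =>
          if PySem.List.pyGetD reach j false then
            pvScan w words prefixes n j.toNat [] (j.toNat + 1) reach
          else reach)
        ((List.replicate (n + 1) false).set 0 true)).getD k false
        = (decide (k = 0) || (List.range J).any (fun j =>
            pvBrk (pvEdgeB w words) j && decide (j < k) && pvEdgeB w words j k)))) := by
  intro J
  induction J with
  | zero =>
    intro _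
    have hnil : PySem.List.pyRange 0 ((0 : Nat) : Int) = [] :=
      PySem.List.pyRange_one_eq_nil (by omega)
    rw [hnil]
    refine ⟨by simp, ?_⟩
    intro k hk
    simp only [List.foldl_nil, List.range_zero, List.any_nil, Bool.or_false]
    match k with
    | 0 => simp
    | k + 1 =>
      rw [List.getD_eq_getElem?_getD, List.getElem?_set_ne (by omega),
        List.getElem?_replicate_of_lt (by omega)]
      simp
  | succ J ihJ =>
    intro hJ
    have ihm := ihJ (by omega)
    have hsplit : PySem.List.pyRange 0 ((J + 1 : Nat) : Int)
        = PySem.List.pyRange 0 ((J : Nat) : Int) ++ [(J : Int)] := by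
      have : ((J + 1 : Nat) : Int) = ((J : Nat) : Int) + 1 := by push_cast; ring
      rw [this, PySem.List.pyRange_one_succ_right (by omega)]
    rw [hsplit, List.foldl_append, List.foldl_cons, List.foldl_nil]
    set reachJ := (PySem.List.pyRange 0 ((J : Nat) : Int)).foldl (fun reach j =>
        if PySem.List.pyGetD reach j false then
          pvScan w words prefixes n j.toNat [] (j.toNat + 1) reach
        else reach)
      ((List.replicate (n + 1) false).set 0 true) with hreachJ
    have hguard : PySem.List.pyGetD reachJ (J : Int) false = pvBrk (pvEdgeB w words) J := by
      rw [PySem.List.pyGetD_natCast, List.getD_eq_getElem?_getD, ← List.getD_eq_getElem?_getD,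
        ihm.2 J (by omega)]
      rw [← pvBrk_eq_closed (pvEdgeB w words) J]
    rw [hguard]
    by_cases hb : pvBrk (pvEdgeB w words) J = true
    · rw [if_pos hb]
      have htn : ((J : Int)).toNat = J := Int.toNat_natCast J
      rw [htn]
      have hscan := pvScan_getD w words prefixes n J hcl hn (J + 1) [] reachJ
        (by omega) (by simp [pvSub]) ihm.1
      constructor
      · rw [length_pvScan, ihm.1]
      · intro k hk
        rw [hscan k hk]
        rw [ihm.2 k hk]
        rw [List.range_succ, List.any_append]
        simp only [List.any_cons, List.any_nil, Bool.or_false]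
        -- boolean juggling
        cases he : pvEdgeB w words J k
        · simp [hb]
        · by_cases hjk : J < k
          · have hT : decide (J + 1 ≤ k ∧ k ≤ n ∧ (true : Bool) = true) = true := by
              simp only [decide_eq_true_eq]
              exact ⟨by omega, hk, trivial⟩
            have hd2 : decide (J < k) = true := by simp [hjk]
            rw [hT, hd2]
            simp [hb]
          · have hT : decide (J + 1 ≤ k ∧ k ≤ n ∧ (true : Bool) = true) = false := by
              simp only [decide_eq_false_iff_not]
              rintro ⟨h1, _, _⟩; omega
            have hd2 : decide (J < k) = false := by simp [hjk]
            rw [hT, hd2]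
            simp [hb]
    · rw [if_neg hb]
      refine ⟨ihm.1, ?_⟩
      intro k hk
      rw [ihm.2 k hk, List.range_succ, List.any_append]
      have hbf : pvBrk (pvEdgeB w words) J = false := by
        cases h : pvBrk (pvEdgeB w words) J
        · rfl
        · exact absurd h hb
      simp [hbf]

theorem pvCanBreak_eq (w : List Char) (words prefixes : PySem.Set (List Char))
    (hcl : pvClosed words prefixes) :
    pvCanBreak w words prefixes = (!decide (w = []) && pvBrk (pvEdgeB w words) w.length) := by
  by_cases hw : w.length = 0
  · have hnil : w = [] := List.length_eq_zero_iff.mp hw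
    subst hnil
    simp [pvCanBreak]
  · have hne : w ≠ [] := by
      intro h; subst h; exact hw rfl
    simp only [pvCanBreak, if_neg hw]
    have h := pvCB_inv w words prefixes hcl w.length rfl w.length (le_refl _)
    rw [PySem.List.pyGetD_natCast, List.getD_eq_getElem?_getD, ← List.getD_eq_getElem?_getD,
      h.2 w.length (le_refl _)]
    rw [pvBrk_eq_closed]
    simp [hne]

theorem pvCanBreak_ne_nil {w : List Char} {words prefixes : PySem.Set (List Char)}
    (h : pvCanBreak w words prefixes = true) : w ≠ [] := by
  intro hnil
  subst hnil
  simp [pvCanBreak] at h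

-- ---------- order facts about sorted2 ----------
def pvBefore (a b : String) : Bool :=
  decide (-(PySem.Str.len a) < -(PySem.Str.len b)) ||
    (!decide (-(PySem.Str.len b) < -(PySem.Str.len a)) && decide (a < b))

theorem pvPairwise_insertBy {before : String → String → Bool}
    (hasym : ∀ a b, before a b = true → before b a = false)
    (htrans : ∀ a b c, before b a = false → before c b = false → before c a = false)
    (x : String) (l : List String) (hl : l.Pairwise (fun a b => before b a = false)) :
    (PySem.List.insertBy before x l).Pairwise (fun a b => before b a = false) := by
  induction l with
  | nil => simp [PySem.List.insertBy]
  | cons y ys ih =>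
    rcases List.pairwise_cons.mp hl with ⟨hy, hys⟩
    rw [PySem.List.insertBy]
    by_cases hxy : before x y = true
    · rw [if_pos hxy]
      refine List.pairwise_cons.mpr ⟨?_, hl⟩
      intro z hz
      rcases List.mem_cons.mp hz with hzy | hzys
      · rw [hzy]; exact hasym x y hxy
      · exact htrans x y z (hasym x y hxy) (hy z hzys)
    · rw [if_neg hxy]
      refine List.pairwise_cons.mpr ⟨?_, ih hys⟩
      intro z hz
      rcases (PySem.List.mem_insertBy before x z ys).mp hz with hzx | hzys
      · rw [hzx]; exact Bool.eq_false_iff.mpr hxy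
      · exact hy z hzys

theorem pvBefore_true_iff (x y : String) : pvBefore x y = true ↔
    (PySem.Str.len y < PySem.Str.len x ∨
      (¬ PySem.Str.len x < PySem.Str.len y ∧ x < y)) := by
  simp only [pvBefore, Bool.or_eq_true, Bool.and_eq_true, Bool.not_eq_true', decide_eq_true_eq,
    decide_eq_false_iff_not]
  constructor
  · rintro (h1 | ⟨h2, h3⟩)
    · left; omega
    · right; exact ⟨by omega, h3⟩
  · rintro (h1 | ⟨h2, h3⟩)
    · left; omega
    · right; exact ⟨by omega, h3⟩

theorem pvBefore_asym (a b : String) (h : pvBefore a b = true) : pvBefore b a = false := by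
  rw [Bool.eq_false_iff]
  intro h'
  rw [pvBefore_true_iff] at h h'
  rcases h with h1 | ⟨h2, h3⟩ <;> rcases h' with h1' | ⟨h2', h3'⟩
  · omega
  · exact h2' h1
  · exact h2 h1'
  · exact lt_asymm h3 h3'

theorem pvBefore_trans (a b c : String) (hba : pvBefore b a = false)
    (hcb : pvBefore c b = false) : pvBefore c a = false := by
  rw [Bool.eq_false_iff]
  intro hca
  rw [Bool.eq_false_iff] at hba hcb
  rw [pvBefore_true_iff] at hca
  rw [Ne, pvBefore_true_iff] at hba hcb
  have nba1 : ¬ PySem.Str.len a < PySem.Str.len b := fun hp => hba (Or.inl hp)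
  have ncb1 : ¬ PySem.Str.len b < PySem.Str.len c := fun hp => hcb (Or.inl hp)
  rcases hca with h1 | ⟨h2, h3⟩
  · omega
  · by_cases hlb : PySem.Str.len b < PySem.Str.len a
    · exact h2 (by omega)
    · by_cases hlc : PySem.Str.len c < PySem.Str.len b
      · exact h2 (by omega)
      · have hnb : ¬ b < a := fun hb' => hba (Or.inr ⟨hlb, hb'⟩)
        have hnc : ¬ c < b := fun hc' => hcb (Or.inr ⟨hlc, hc'⟩)
        exact absurd h3 (not_lt.mpr (le_trans (not_lt.mp hnb) (not_lt.mp hnc)))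

theorem pvFoldl_insertBy_pairwise :
    ∀ (xs acc : List String), acc.Pairwise (fun a b => pvBefore b a = false) →
    (xs.foldl (fun acc x => PySem.List.insertBy pvBefore x acc) acc).Pairwise
      (fun a b => pvBefore b a = false) := by
  intro xs
  induction xs with
  | nil => intro acc h; exact h
  | cons x xs ih =>
    intro acc h
    exact ih _ (pvPairwise_insertBy pvBefore_asym pvBefore_trans x acc h)

theorem pvBefore_false_lenGE (a b : String) (h : pvBefore b a = false) : pvLenGE a b := by
  rw [Bool.eq_false_iff] at h
  by_contra hc
  unfold pvLenGE at hc
  apply h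
  simp only [pvBefore, Bool.or_eq_true, decide_eq_true_eq]
  left
  rw [PySem.Str.len_eq, PySem.Str.len_eq]
  omega

theorem pvSorted2_pairwise (xs : List String) :
    (PySem.List.sorted2 xs (fun x => -(PySem.Str.len x)) (fun x => x) false).Pairwise pvLenGE := by
  have heq : PySem.List.sorted2 xs (fun x => -(PySem.Str.len x)) (fun x => x) false
      = xs.foldl (fun acc x => PySem.List.insertBy pvBefore x acc) [] := rfl
  rw [heq]
  exact (pvFoldl_insertBy_pairwise xs [] List.Pairwise.nil).imp
    (fun h => pvBefore_false_lenGE _ _ h)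

-- ---------- the per-word equivalence ----------
theorem pvBoolExt {x y : Bool} (h : x = true ↔ y = true) : x = y := by
  cases x <;> cases y <;> simp_all

theorem pvKey (W : List String) (w : String) (P : List String) (S words prefixes : PySem.Set (List Char))
    (hS : ∀ s, s ∈ S ↔ s ∈ W.map String.toList ∧ s ∉ P.map String.toList)
    (hlen : ∀ p ∈ P, w.toList.length ≤ p.toList.length)
    (hwP : w ∈ P)
    (hwords : ∀ s, s ∈ words ↔ s ∈ W.map String.toList)
    (hcl : pvClosed words prefixes) :
    pvIsCompounded w.toList S = pvCanBreak w.toList words prefixes := by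
  rw [pvIsCompounded_eq, pvCanBreak_eq _ _ _ hcl]
  congr 1
  apply pvBrk_congr (N := w.toList.length) _ _ (le_refl _)
  intro j i hji hin
  apply pvBoolExt
  by_cases hfull : j = 0 ∧ i = w.toList.length
  · obtain ⟨hj0, hiN⟩ := hfull
    have hsub : pvSub w.toList j i = w.toList := by
      subst hj0 hiN
      unfold pvSub
      simp
    unfold pvEdgeA pvEdgeB
    rw [hsub]
    have hA : PySem.Set.contains S w.toList = false := by
      rw [Bool.eq_false_iff, Ne, PySem.Set.contains_iff, hS]
      rintro ⟨_, hnot⟩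
      exact hnot (List.mem_map_of_mem hwP)
    have hB : (decide (j = 0) && decide (i = w.toList.length)) = true := by
      subst hj0 hiN; simp
    rw [hA, hB]
    simp
  · have hlensub : (pvSub w.toList j i).length < w.toList.length := by
      rw [length_pvSub w.toList j i (by omega) hin]
      omega
    have hnotP : pvSub w.toList j i ∉ P.map String.toList := by
      intro hmem
      rcases List.mem_map.mp hmem with ⟨p, hp, hpe⟩
      have := hlen p hp
      rw [hpe] at this
      omega
    have hguard : (decide (j = 0) && decide (i = w.toList.length)) = false := by
      rcases Decidable.not_and_iff_not_or_not.mp hfull with h | h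
      · rw [decide_eq_false h, Bool.false_and]
      · rw [decide_eq_false h, Bool.and_false]
    unfold pvEdgeA pvEdgeB
    rw [hguard]
    rw [PySem.Set.contains_iff, hS]
    simp only [Bool.not_false, Bool.and_true, PySem.Set.contains_iff, hwords]
    simp [hnotP]

-- ---------- the outer loop ----------
theorem pvFoldl_done (r : List String) (st : PySem.Set (List Char) × String × String × Bool)
    (h : st.2.2.2 = true) : r.foldl pvStepA st = st := by
  induction r with
  | nil => rfl
  | cons x r ih =>
    rw [List.foldl_cons]
    have hstep : pvStepA st x = st := by
      unfold pvStepA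
      rw [if_pos h]
    rw [hstep, ih]

theorem pvOuter_one (W : List String) (words prefixes : PySem.Set (List Char))
    (hwords : ∀ s, s ∈ words ↔ s ∈ W.map String.toList)
    (hcl : pvClosed words prefixes) :
    ∀ (r P : List String) (S : PySem.Set (List Char)) (f : String),
    (P ++ r).Perm W → (P ++ r).Nodup → (P ++ r).Pairwise pvLenGE →
    (∀ s, s ∈ S ↔ s ∈ W.map String.toList ∧ s ∉ P.map String.toList) →
    f ≠ "" →
    ((r.foldl pvStepA (S, f, "", false)).2.1, (r.foldl pvStepA (S, f, "", false)).2.2.1) =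
      (f, match pvFirstRest (fun w => pvCanBreak w.toList words prefixes) r with
          | none => ""
          | some (s, _) => s) := by
  intro r
  induction r with
  | nil =>
    intro P S f _ _ _ _ hf
    rfl
  | cons w r' ih =>
    intro P S f hperm hnodup hpw hS hf
    -- the head word is in the current set
    have hwr : w ∈ P ++ (w :: r') := List.mem_append_right _ (List.mem_cons_self)
    have hwW : w.toList ∈ W.map String.toList :=
      List.mem_map_of_mem (hperm.subset hwr)
    have hwnotP : w.toList ∉ P.map String.toList := by
      intro hmem
      rcases List.mem_map.mp hmem with ⟨p, hp, hpe⟩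
      have : p = w := String.toList_inj.mp hpe
      subst this
      exact (List.disjoint_of_nodup_append hnodup) hp List.mem_cons_self
    have hmemS : w.toList ∈ S := (hS w.toList).mpr ⟨hwW, hwnotP⟩
    have hrm : (PySem.Set.remove? S w.toList).getD S = S.discard w.toList := by
      rw [PySem.Set.remove?_of_mem hmemS]; rfl
    have hS' : ∀ s, s ∈ S.discard w.toList ↔
        s ∈ W.map String.toList ∧ s ∉ (P ++ [w]).map String.toList := by
      intro s
      rw [PySem.Set.mem_discard, hS]
      simp only [List.map_append, List.map_cons, List.map_nil, List.mem_append,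
        List.mem_cons, List.not_mem_nil]
      tauto
    have hpairPB : ∀ p ∈ P ++ [w], w.toList.length ≤ p.toList.length := by
      intro p hp
      rcases List.mem_append.mp hp with hpP | hpw'
      · have := (List.pairwise_append.mp hpw).2.2 p hpP w List.mem_cons_self
        exact this
      · rw [List.mem_singleton.mp hpw']
    have hcomp : pvIsCompounded w.toList (S.discard w.toList)
        = pvCanBreak w.toList words prefixes :=
      pvKey W w (P ++ [w]) _ words prefixes hS' hpairPB
        (List.mem_append_right _ (List.mem_singleton_self w)) hwords hcl
    have hassoc : (P ++ [w]) ++ r' = P ++ (w :: r') := by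
      rw [List.append_assoc]; rfl
    rw [List.foldl_cons]
    have hstep : pvStepA (S, f, "", false) w
        = (if pvCanBreak w.toList words prefixes
           then (S.discard w.toList, f, w, true)
           else (S.discard w.toList, f, "", false)) := by
      unfold pvStepA
      rw [if_neg (by simp)]
      simp only [hrm, hcomp]
      split <;> rfl
    rw [hstep]
    by_cases hc : pvCanBreak w.toList words prefixes = true
    · rw [if_pos hc]
      rw [pvFoldl_done r' _ rfl]
      show (f, w) = _
      rw [pvFirstRest, if_pos hc]
    · rw [if_neg hc, pvFirstRest, if_neg hc]
      exact ih (P ++ [w]) (S.discard w.toList) f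
        (by rw [hassoc]; exact hperm) (by rw [hassoc]; exact hnodup)
        (by rw [hassoc]; exact hpw) hS' hf

theorem pvOuter_zero (W : List String) (words prefixes : PySem.Set (List Char))
    (hwords : ∀ s, s ∈ words ↔ s ∈ W.map String.toList)
    (hcl : pvClosed words prefixes) :
    ∀ (r P : List String) (S : PySem.Set (List Char)),
    (P ++ r).Perm W → (P ++ r).Nodup → (P ++ r).Pairwise pvLenGE →
    (∀ s, s ∈ S ↔ s ∈ W.map String.toList ∧ s ∉ P.map String.toList) →
    ((r.foldl pvStepA (S, "", "", false)).2.1, (r.foldl pvStepA (S, "", "", false)).2.2.1) =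
      (match pvFirstRest (fun w => pvCanBreak w.toList words prefixes) r with
       | none => ("", "")
       | some (f, rest) =>
         match pvFirstRest (fun w => pvCanBreak w.toList words prefixes) rest with
         | none => (f, "")
         | some (s, _) => (f, s)) := by
  intro r
  induction r with
  | nil =>
    intro P S _ _ _ _
    rfl
  | cons w r' ih =>
    intro P S hperm hnodup hpw hS
    have hwr : w ∈ P ++ (w :: r') := List.mem_append_right _ (List.mem_cons_self)
    have hwW : w.toList ∈ W.map String.toList :=
      List.mem_map_of_mem (hperm.subset hwr)
    have hwnotP : w.toList ∉ P.map String.toList := by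
      intro hmem
      rcases List.mem_map.mp hmem with ⟨p, hp, hpe⟩
      have : p = w := String.toList_inj.mp hpe
      subst this
      exact (List.disjoint_of_nodup_append hnodup) hp List.mem_cons_self
    have hmemS : w.toList ∈ S := (hS w.toList).mpr ⟨hwW, hwnotP⟩
    have hrm : (PySem.Set.remove? S w.toList).getD S = S.discard w.toList := by
      rw [PySem.Set.remove?_of_mem hmemS]; rfl
    have hS' : ∀ s, s ∈ S.discard w.toList ↔
        s ∈ W.map String.toList ∧ s ∉ (P ++ [w]).map String.toList := by
      intro s
      rw [PySem.Set.mem_discard, hS]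
      simp only [List.map_append, List.map_cons, List.map_nil, List.mem_append,
        List.mem_cons, List.not_mem_nil]
      tauto
    have hpairPB : ∀ p ∈ P ++ [w], w.toList.length ≤ p.toList.length := by
      intro p hp
      rcases List.mem_append.mp hp with hpP | hpw'
      · have := (List.pairwise_append.mp hpw).2.2 p hpP w List.mem_cons_self
        exact this
      · rw [List.mem_singleton.mp hpw']
    have hcomp : pvIsCompounded w.toList (S.discard w.toList)
        = pvCanBreak w.toList words prefixes :=
      pvKey W w (P ++ [w]) _ words prefixes hS' hpairPB
        (List.mem_append_right _ (List.mem_singleton_self w)) hwords hcl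
    have hassoc : (P ++ [w]) ++ r' = P ++ (w :: r') := by
      rw [List.append_assoc]; rfl
    rw [List.foldl_cons]
    have hstep : pvStepA (S, "", "", false) w
        = (if pvCanBreak w.toList words prefixes
           then (S.discard w.toList, w, "", false)
           else (S.discard w.toList, "", "", false)) := by
      unfold pvStepA
      rw [if_neg (by simp)]
      simp only [hrm, hcomp]
      split <;> simp
    rw [hstep]
    by_cases hc : pvCanBreak w.toList words prefixes = true
    · rw [if_pos hc]
      have hwne : w ≠ "" := by
        intro h
        apply pvCanBreak_ne_nil hc
        rw [h]; rfl
      rw [pvFirstRest, if_pos hc]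
      have hone := pvOuter_one W words prefixes hwords hcl r' (P ++ [w]) (S.discard w.toList) w
        (by rw [hassoc]; exact hperm) (by rw [hassoc]; exact hnodup)
        (by rw [hassoc]; exact hpw) hS' hwne
      cases hfr : pvFirstRest (fun w => pvCanBreak w.toList words prefixes) r' with
      | none =>
        rw [hfr] at hone
        simp only [hfr]
        simpa using hone
      | some p =>
        rw [hfr] at hone
        simp only [hfr]
        simpa using hone
    · rw [if_neg hc, pvFirstRest, if_neg hc]
      exact ih (P ++ [w]) (S.discard w.toList)
        (by rw [hassoc]; exact hperm) (by rw [hassoc]; exact hnodup)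
        (by rw [hassoc]; exact hpw) hS'

theorem pvClosed_B (word_list : List String) :
    pvClosed
      (PySem.Set.ofList ((PySem.List.sorted2 word_list (fun x => -(PySem.Str.len x)) (fun x => x) false).map String.toList))
      (PySem.Set.ofList ((PySem.List.sorted2 word_list (fun x => -(PySem.Str.len x)) (fun x => x) false).flatMap (fun w =>
        (PySem.List.pyRange 1 (PySem.Str.len w + 1)).map
          (fun k => PySem.List.slice w.toList none (some k))))) := by
  intro s hs k hk1 hk2
  rw [PySem.Set.mem_ofList] at hs ⊢
  rcases List.mem_map.mp hs with ⟨v, hv, hve⟩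
  subst hve
  apply List.mem_flatMap.mpr
  refine ⟨v, hv, ?_⟩
  apply List.mem_map.mpr
  refine ⟨(k : Int), ?_, ?_⟩
  · rw [PySem.List.mem_pyRange_one]
    refine ⟨by exact_mod_cast hk1, ?_⟩
    rw [PySem.Str.len_eq]
    have : k ≤ v.toList.length := hk2
    omega
  · rw [PySem.List.slice_to _ (by omega), Int.toNat_natCast]

-- ===== VERDICT (by name: the statement is the Claim_ definition above) =====
theorem find_longest_and_second_longest_compounded_words_spec : Claim_equal_find_longest_and_second_longest_compounded_words := by
  intro word_list _ hpre
  have hnd : word_list.Nodup := hpre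
  unfold Spec_find_longest_and_second_longest_compounded_words
  simp only [find_longest_and_second_longest_compounded_words,
    find_longest_and_second_longest_compounded_words_alt]
  have hperm := PySem.List.sorted2_perm word_list
    (fun x => -(PySem.Str.len x)) (fun x => x) false
  refine pvOuter_zero word_list _ _ ?_ (pvClosed_B word_list) _ [] _ ?_ ?_ ?_ ?_
  · intro s
    rw [PySem.Set.mem_ofList]
    exact (hperm.map String.toList).mem_iff
  · simpa using hperm
  · simpa using (hperm.nodup_iff).mpr hnd
  · simpa using pvSorted2_pairwise word_list
  · intro s
    rw [PySem.Set.mem_ofList]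
    simp
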